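-- pv_equiv track=rewrite | github.com/benjaminrall/connect-four | Old (2019)/checker.py | checkVerticalWin
-- ===== SOURCE A (Python) =====
-- def getPlayer(player):
--     if player == 0:
--         return "P"
--     elif player == 1:
--         return "C"
--     return "O"
--
-- def checkVerticalWin(grid, player):
--     player = getPlayer(player)
--     for column in range(len(grid[0])):
--         inRow = 0
--         for row in range(len(grid)):
--             if grid[row][column] == player:
--                 inRow += 1
--             elif grid[row][column] != player and inRow < 4:
--                 inRow = 0
--         if inRow >= 4:
--             return True
--     return False
-- ===== SOURCE B (Python) =====
-- def getPlayer(player):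
--     if player == 0:
--         return "P"
--     elif player == 1:
--         return "C"
--     return "O"
--
-- def checkVerticalWin(grid, player):
--     p = getPlayer(player)
--     win = [p] * 4
--     for column in range(len(grid[0])):
--         col = [grid[row][column] for row in range(len(grid))]
--         if any(col[i:i + 4] == win for i in range(len(col) - 3)):
--             return True
--     return False
-- ===== Notes on version B (the rewrite author's own statement) =====
-- stated objective: alternative
-- what changed: B replaces A's per-column running-counter state machine (with its special never-reset-after-4 rule) by materialising each column as a list and testing every length-4 window slice against [player]*4.
-- outside the precondition, e.g. on checkVerticalWin([['P', 'X'], ['P'], ['P', 'X'], ['P', 'X']], 0): A returns True, B returns True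
import Mathlib
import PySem

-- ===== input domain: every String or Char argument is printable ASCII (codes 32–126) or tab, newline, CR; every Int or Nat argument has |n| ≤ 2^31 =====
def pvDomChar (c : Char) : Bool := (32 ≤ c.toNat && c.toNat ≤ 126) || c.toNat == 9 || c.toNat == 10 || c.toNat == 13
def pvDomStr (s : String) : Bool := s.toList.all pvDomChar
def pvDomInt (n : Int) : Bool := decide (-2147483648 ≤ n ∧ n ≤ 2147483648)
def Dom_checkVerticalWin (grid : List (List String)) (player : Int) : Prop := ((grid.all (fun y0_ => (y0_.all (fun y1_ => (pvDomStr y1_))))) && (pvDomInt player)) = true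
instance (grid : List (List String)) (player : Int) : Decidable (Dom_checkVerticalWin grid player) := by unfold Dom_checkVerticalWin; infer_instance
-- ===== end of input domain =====

-- B replaces the per-column running-counter state machine by building each column list and
-- testing length-4 window slices against [player]*4; alternative formulation, same cost.

-- ===== PORT A =====
def getPlayerL (player : Int) : String :=
  if player = 0 then "P" else if player = 1 then "C" else "O"

def checkVerticalWin (grid : List (List String)) (player : Int) : Bool :=
  let p := getPlayerL player
  (PySem.List.pyRange 0 ((PySem.List.pyGetD grid 0 []).length : Int) 1).foldl
    (fun acc column =>
      if acc then acc
      else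
        let inRow : Int :=
          (PySem.List.pyRange 0 ((grid.length : Int)) 1).foldl
            (fun inRow row =>
              let cell := PySem.List.pyGetD (PySem.List.pyGetD grid row []) column ""
              if cell == p then inRow + 1
              else if cell ≠ p ∧ inRow < 4 then 0 else inRow) 0
        decide (4 ≤ inRow))
    false

-- ===== PORT B =====
def checkVerticalWin_alt (grid : List (List String)) (player : Int) : Bool :=
  let p := getPlayerL player
  let win := [p, p, p, p]
  (PySem.List.pyRange 0 ((PySem.List.pyGetD grid 0 []).length : Int) 1).foldl
    (fun acc column =>
      if acc then true
      else
        let col := (PySem.List.pyRange 0 ((grid.length : Int)) 1).map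
          (fun row => PySem.List.pyGetD (PySem.List.pyGetD grid row []) column "")
        (PySem.List.pyRange 0 ((col.length : Int) - 3) 1).any
          (fun i => PySem.List.slice col (some i) (some (i + 4)) == win))
    false

-- ===== PRECONDITION & SPEC =====
-- Pre_ excludes the inputs on which A may raise IndexError: the empty grid (grid[0]) and ragged
-- grids where some row is shorter than the first row; on a few such ragged grids A still returns
-- True before reaching the short row (both programs agree there — see the cite).
def Pre_checkVerticalWin (grid : List (List String)) (player : Int) : Prop :=
  grid ≠ [] ∧ ∀ row ∈ grid, (grid.headD []).length ≤ row.length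
instance (grid : List (List String)) (player : Int) : Decidable (Pre_checkVerticalWin grid player) := by unfold Pre_checkVerticalWin; infer_instance

def pvWitness_checkVerticalWin : List (List String) × Int := ([["P"], ["P"], ["P"], ["P"]], 0)

def Spec_checkVerticalWin (grid : List (List String)) (player : Int) (out : Bool) : Prop := out = checkVerticalWin_alt grid player
instance (grid : List (List String)) (player : Int) (out : Bool) : Decidable (Spec_checkVerticalWin grid player out) := by unfold Spec_checkVerticalWin; infer_instance

-- ===== CLAIM (what is proved, stated in full; the proofs are below) =====
def Claim_equal_checkVerticalWin : Prop := ∀ (grid : List (List String)) (player : Int), Dom_checkVerticalWin grid player → Pre_checkVerticalWin grid player → Spec_checkVerticalWin grid player (checkVerticalWin grid player)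

-- ===== LEMMAS AND PROOFS =====

-- A's inner-loop body as a named step function (definitionally the lambda in port A).
def vstep (p : String) (n : Int) (cell : String) : Int :=
  if cell == p then n + 1 else if cell ≠ p ∧ n < 4 then 0 else n

-- "some four consecutive cells equal p"
def Run (p : String) (cells : List String) : Prop :=
  ∃ k : Nat, (cells.drop k).take 4 = [p, p, p, p]

theorem repl4 (p : String) : List.replicate 4 p = [p, p, p, p] := rfl

theorem run_nil (p : String) : ¬ Run p ([] : List String) := by
  rintro ⟨k, hk⟩; simp at hk

theorem run_cons (p c : String) (cs : List String) :
    Run p (c :: cs) ↔ (c :: cs).take 4 = [p, p, p, p] ∨ Run p cs := by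
  constructor
  · rintro ⟨k, hk⟩
    cases k with
    | zero => exact Or.inl hk
    | succ k => exact Or.inr ⟨k, hk⟩
  · rintro (h | ⟨k, hk⟩)
    · exact ⟨0, h⟩
    · exact ⟨k + 1, hk⟩

theorem fold_ge4 (p : String) : ∀ (cells : List String) (n : Int), 4 ≤ n →
    4 ≤ cells.foldl (vstep p) n := by
  intro cells
  induction cells with
  | nil => intro n h; simpa using h
  | cons c cs ih =>
    intro n h
    simp only [List.foldl_cons]
    by_cases hc : c = p
    · exact ih _ (by simp only [vstep, hc]; simp; omega)
    · have hv : vstep p n c = n := by simp only [vstep]; simp [hc]; omega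
      rw [hv]; exact ih _ h

theorem fold_char (p : String) : ∀ (cells : List String) (n : Int) (m : Nat),
    0 ≤ n → n + (m : Int) = 4 → 1 ≤ m →
    (4 ≤ cells.foldl (vstep p) n ↔
      (cells.take m = List.replicate m p ∨ Run p cells)) := by
  intro cells
  induction cells with
  | nil =>
    intro n m h0 hm h1
    simp only [List.foldl_nil, List.take_nil]
    constructor
    · intro h; omega
    · rintro (h | h)
      · have := congrArg List.length h; simp at this; omega
      · exact absurd h (run_nil p)
  | cons c cs ih =>
    intro n m h0 hm h1
    obtain ⟨m', rfl⟩ : ∃ m', m = m' + 1 := ⟨m - 1, by omega⟩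
    simp only [List.foldl_cons]
    by_cases hc : c = p
    · have hv : vstep p n c = n + 1 := by simp [vstep, hc]
      rw [hv]
      by_cases hm1 : m' = 0
      · subst hm1
        have hL : 4 ≤ cs.foldl (vstep p) (n + 1) := fold_ge4 p cs (n + 1) (by omega)
        constructor
        · intro _; left; simp [hc]
        · intro _; exact hL
      · rw [ih (n + 1) m' (by omega) (by omega) (by omega)]
        constructor
        · rintro (h | h)
          · left
            rw [List.take_succ_cons, List.replicate_succ, hc]
            exact congrArg _ h
          · right; exact (run_cons p c cs).mpr (Or.inr h)
        · rintro (h | h)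
          · left
            rw [List.take_succ_cons, List.replicate_succ] at h
            exact (List.cons_eq_cons.mp h).2
          · rcases (run_cons p c cs).mp h with h0 | htail
            · left
              rw [List.take_succ_cons, ← repl4, List.replicate_succ] at h0
              have h3 : cs.take 3 = List.replicate 3 p := (List.cons_eq_cons.mp h0).2
              have hle : m' ≤ 3 := by omega
              calc cs.take m' = (cs.take 3).take m' := by
                    rw [List.take_take]; congr 1; omega
                _ = List.replicate m' p := by
                    rw [h3, List.take_replicate]; congr 1; omega
            · right; exact htail
    · -- c ≠ p : the counter resets to 0 (here n < 4)
      have hv : vstep p n c = 0 := by simp only [vstep]; simp [hc]; omega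
      rw [hv, ih 0 4 le_rfl (by norm_num) (by omega)]
      have hL : (cs.take 4 = List.replicate 4 p ∨ Run p cs) ↔ Run p cs := by
        constructor
        · rintro (h | h)
          · exact ⟨0, by simpa [repl4] using h⟩
          · exact h
        · exact Or.inr
      have hR : ((c :: cs).take (m' + 1) = List.replicate (m' + 1) p ∨ Run p (c :: cs)) ↔
          Run p cs := by
        constructor
        · rintro (h | h)
          · exfalso
            rw [List.take_succ_cons, List.replicate_succ] at h
            exact hc (List.cons_eq_cons.mp h).1
          · rcases (run_cons p c cs).mp h with h0 | htail
            · exfalso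
              rw [show (4:Nat) = 3 + 1 from rfl, List.take_succ_cons, ← repl4,
                List.replicate_succ] at h0
              exact hc (List.cons_eq_cons.mp h0).1
            · exact htail
        · intro h; exact Or.inr ((run_cons p c cs).mpr (Or.inr h))
      rw [hL, hR]

-- A's column verdict characterised: counter reaches 4 iff the column has a run of four.
theorem fold_run (p : String) (cells : List String) :
    4 ≤ cells.foldl (vstep p) 0 ↔ Run p cells := by
  rw [fold_char p cells 0 4 le_rfl (by norm_num) (by omega)]
  constructor
  · rintro (h | h)
    · exact ⟨0, by simpa [repl4] using h⟩
    · exact h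
  · exact Or.inr

-- B's column verdict characterised: some window slice equals [p,p,p,p] iff Run.
theorem any_run (p : String) (cells : List String) :
    ((PySem.List.pyRange 0 ((cells.length : Int) - 3) 1).any
      (fun i => PySem.List.slice cells (some i) (some (i + 4)) == [p, p, p, p])) = true ↔
      Run p cells := by
  rw [List.any_eq_true]
  constructor
  · rintro ⟨i, hi, hslice⟩
    rw [PySem.List.mem_pyRange_one] at hi
    rw [beq_iff_eq] at hslice
    refine ⟨i.toNat, ?_⟩
    rw [PySem.List.slice_toNat cells hi.1 (by omega)] at hslice
    have h4 : (i + 4).toNat - i.toNat = 4 := by omega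
    rwa [h4] at hslice
  · rintro ⟨k, hk⟩
    have hlen : k + 4 ≤ cells.length := by
      have := congrArg List.length hk
      simp [List.length_take, List.length_drop] at this
      omega
    refine ⟨(k : Int), ?_, ?_⟩
    · rw [PySem.List.mem_pyRange_one]
      constructor
      · exact Int.natCast_nonneg k
      · omega
    · rw [beq_iff_eq, PySem.List.slice_toNat cells (Int.natCast_nonneg k) (by positivity)]
      have h4 : ((k : Int) + 4).toNat - ((k : Int)).toNat = 4 := by omega
      rw [h4, Int.toNat_natCast]
      exact hk

-- The inner row loop of port A equals the counter fold over the materialised column.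
theorem innerA_eq (grid : List (List String)) (p : String) (column : Int) :
    ((PySem.List.pyRange 0 ((grid.length : Int)) 1).foldl
      (fun inRow row =>
        let cell := PySem.List.pyGetD (PySem.List.pyGetD grid row []) column ""
        if cell == p then inRow + 1
        else if cell ≠ p ∧ inRow < 4 then 0 else inRow) (0 : Int)) =
    (grid.map (fun row => PySem.List.pyGetD row column "")).foldl (vstep p) 0 := by
  have h1 := PySem.List.foldl_pyRange_zero_pyGetD' grid ([] : List String)
    (fun n row => vstep p n (PySem.List.pyGetD row column "")) (0 : Int)
  have h2 : grid.foldl (fun n row => vstep p n (PySem.List.pyGetD row column "")) 0 =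
      (grid.map (fun row => PySem.List.pyGetD row column "")).foldl (vstep p) 0 :=
    (List.foldl_map).symm
  exact h1.trans h2

-- The column list built by port B equals the materialised column.
theorem colB_eq (grid : List (List String)) (column : Int) :
    ((PySem.List.pyRange 0 ((grid.length : Int)) 1).map
      (fun row => PySem.List.pyGetD (PySem.List.pyGetD grid row []) column "")) =
    grid.map (fun row => PySem.List.pyGetD row column "") := by
  have h1 : ((PySem.List.pyRange 0 ((grid.length : Int)) 1).map
      (fun row => PySem.List.pyGetD grid row ([] : List String))).map
      (fun row => PySem.List.pyGetD row column "") =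
      grid.map (fun row => PySem.List.pyGetD row column "") := by
    rw [PySem.List.map_pyGetD_pyRange_zero']
  rw [← h1, List.map_map]
  rfl

-- Per-column verdicts of the two ports coincide.
theorem column_eq (grid : List (List String)) (p : String) (column : Int) :
    (decide (4 ≤ (PySem.List.pyRange 0 ((grid.length : Int)) 1).foldl
      (fun inRow row =>
        let cell := PySem.List.pyGetD (PySem.List.pyGetD grid row []) column ""
        if cell == p then inRow + 1
        else if cell ≠ p ∧ inRow < 4 then 0 else inRow) (0 : Int))) =
    (let col := (PySem.List.pyRange 0 ((grid.length : Int)) 1).map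
        (fun row => PySem.List.pyGetD (PySem.List.pyGetD grid row []) column "");
      (PySem.List.pyRange 0 ((col.length : Int) - 3) 1).any
        (fun i => PySem.List.slice col (some i) (some (i + 4)) == [p, p, p, p])) := by
  simp only [colB_eq, innerA_eq]
  set cells := grid.map (fun row => PySem.List.pyGetD row column "") with hcells
  rcases Bool.eq_false_or_eq_true
      ((PySem.List.pyRange 0 ((cells.length : Int) - 3) 1).any
        (fun i => PySem.List.slice cells (some i) (some (i + 4)) == [p, p, p, p])) with hb | hb
  · rw [hb, decide_eq_true_eq, fold_run, ← any_run p cells, hb]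
  · rw [hb, decide_eq_false_iff_not, fold_run, ← any_run p cells, hb]
    simp

-- ===== VERDICT (by name: the statement is the Claim_ definition above) =====
theorem checkVerticalWin_spec : Claim_equal_checkVerticalWin := by
  intro grid player _hDom _hPre
  unfold Spec_checkVerticalWin
  simp only [checkVerticalWin, checkVerticalWin_alt]
  congr 1
  funext acc column
  cases acc with
  | true => rfl
  | false =>
    simpa using column_eq grid (getPlayerL player) column
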